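-- pv_equiv track=rewrite | github.com/diegosouzapw/omni-skills | tools/scripts/validate_contribution_scope.py | classify_paths
-- ===== SOURCE A (Python) =====
-- def classify_paths(paths: list[str]) -> tuple[list[str], list[str], list[str]]:
--     native = []
--     curated = []
--     other = []
--     for item in paths:
--         if item.startswith("skills/"):
--             native.append(item)
--         elif item.startswith("skills_omni/"):
--             curated.append(item)
--         elif item == "data/bundles.json":
--             continue
--         else:
--             other.append(item)
--     return native, curated, other
-- ===== SOURCE B (Python) =====
-- def classify_paths(paths: list[str]) -> tuple[list[str], list[str], list[str]]:
--     native = [p for p in paths if p.startswith("skills/")]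
--     curated = [p for p in paths if p.startswith("skills_omni/")]
--     other = [p for p in paths
--              if not p.startswith("skills/")
--              and not p.startswith("skills_omni/")
--              and p != "data/bundles.json"]
--     return native, curated, other
-- ===== Notes on version B (the rewrite author's own statement) =====
-- stated objective: idiomatic
-- what changed: The single append-loop with mutable accumulators is replaced by three independent filtering comprehensions over the input, one per bucket.
import Mathlib
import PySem

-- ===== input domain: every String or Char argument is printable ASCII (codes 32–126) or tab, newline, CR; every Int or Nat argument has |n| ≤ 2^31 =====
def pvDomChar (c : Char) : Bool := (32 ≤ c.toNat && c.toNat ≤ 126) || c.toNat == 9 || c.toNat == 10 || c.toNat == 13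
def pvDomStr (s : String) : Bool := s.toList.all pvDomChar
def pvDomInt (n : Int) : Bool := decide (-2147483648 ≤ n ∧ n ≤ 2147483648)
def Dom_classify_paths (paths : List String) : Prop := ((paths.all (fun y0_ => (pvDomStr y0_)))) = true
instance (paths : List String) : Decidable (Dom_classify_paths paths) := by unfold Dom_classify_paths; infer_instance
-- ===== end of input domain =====

-- B replaces A's single append-loop with three filtering passes (idiomatic; same cost).

-- ===== PORT A =====
-- A: one loop over paths, appending each item to one of three accumulators (or skipping it).
def classify_paths (paths : List String) : List String × List String × List String :=
  paths.foldl
    (fun acc item =>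
      if PySem.Str.startswith item "skills/" then (acc.1 ++ [item], acc.2.1, acc.2.2)
      else if PySem.Str.startswith item "skills_omni/" then (acc.1, acc.2.1 ++ [item], acc.2.2)
      else if item = "data/bundles.json" then acc
      else (acc.1, acc.2.1, acc.2.2 ++ [item]))
    ([], [], [])

-- ===== PORT B =====
-- B: three independent filtered passes.
def classify_paths_alt (paths : List String) : List String × List String × List String :=
  ( paths.filter (fun p => PySem.Str.startswith p "skills/")
  , paths.filter (fun p => PySem.Str.startswith p "skills_omni/")
  , paths.filter (fun p =>
      !(PySem.Str.startswith p "skills/") && !(PySem.Str.startswith p "skills_omni/")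
        && p != "data/bundles.json") )

-- ===== PRECONDITION & SPEC =====
def Spec_classify_paths (paths : List String) (out : List String × List String × List String) : Prop := out = classify_paths_alt paths
instance (paths : List String) (out : List String × List String × List String) : Decidable (Spec_classify_paths paths out) := by unfold Spec_classify_paths; infer_instance

-- ===== CLAIM (what is proved, stated in full; the proofs are below) =====
def Claim_equal_classify_paths : Prop := ∀ (paths : List String), Dom_classify_paths paths → Spec_classify_paths paths (classify_paths paths)

-- ===== LEMMAS AND PROOFS =====

-- A string starting with "skills/" does not start with "skills_omni/" (char 6 differs).
theorem startswith_excl (p : String) (h : PySem.Str.startswith p "skills/" = true) :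
    PySem.Str.startswith p "skills_omni/" = false := by
  rw [PySem.Str.startswith_eq] at *
  by_contra hc
  rw [Bool.not_eq_false, PySem.Chars.startswith_iff] at hc
  rw [PySem.Chars.startswith_iff] at h
  rcases List.prefix_or_prefix_of_prefix h hc with h' | h' <;> revert h' <;> decide

-- A's loop, started from arbitrary accumulators, appends the three filters.
theorem classify_paths_foldl (paths : List String) (n c o : List String) :
    paths.foldl
      (fun acc item =>
        if PySem.Str.startswith item "skills/" then (acc.1 ++ [item], acc.2.1, acc.2.2)
        else if PySem.Str.startswith item "skills_omni/" then (acc.1, acc.2.1 ++ [item], acc.2.2)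
        else if item = "data/bundles.json" then acc
        else (acc.1, acc.2.1, acc.2.2 ++ [item]))
      (n, c, o)
    = ( n ++ paths.filter (fun p => PySem.Str.startswith p "skills/")
      , c ++ paths.filter (fun p => PySem.Str.startswith p "skills_omni/")
      , o ++ paths.filter (fun p =>
          !(PySem.Str.startswith p "skills/") && !(PySem.Str.startswith p "skills_omni/")
            && p != "data/bundles.json") ) := by
  induction paths generalizing n c o with
  | nil => simp
  | cons h t ih =>
    by_cases h1 : PySem.Str.startswith h "skills/"
    · have h2 := startswith_excl h h1
      simp only [List.foldl_cons, List.filter_cons, h1, h2, if_true, Bool.not_true,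
        Bool.false_and, Bool.false_eq_true, if_false, ih]
      simp
    · by_cases h2 : PySem.Str.startswith h "skills_omni/"
      · simp only [List.foldl_cons, List.filter_cons, h1, h2, if_true,
          Bool.not_true, Bool.false_eq_true, if_false,
          ih]
        simp
      · rw [Bool.not_eq_true] at h1 h2
        by_cases h3 : h = "data/bundles.json"
        · subst h3
          simp only [List.foldl_cons, List.filter_cons, h1, h2, Bool.false_eq_true, if_false,
            Bool.not_false, Bool.true_and, ih]
          simp
        · simp only [List.foldl_cons, List.filter_cons, h1, h2, Bool.false_eq_true, if_false,
            Bool.not_false, Bool.true_and, if_neg h3, ih]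
          simp [h3]

-- ===== VERDICT (by name: the statement is the Claim_ definition above) =====
theorem classify_paths_spec : Claim_equal_classify_paths := by
  intro paths _
  show classify_paths paths = classify_paths_alt paths
  unfold classify_paths classify_paths_alt
  simpa using classify_paths_foldl paths [] [] []
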